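-- pv_equiv track=rewrite | github.com/scorchederf/obsidian-secops | utils/compare_vaults.py | normalize_tool_sections
-- ===== SOURCE A (Python) =====
-- def normalize_tool_sections(lines):
--     normalized_lines = []
--     index = 0
--     while index < len(lines):
--         line = lines[index]
--         if line == "## Tools":
--             normalized_lines.append(line)
--             index += 1
--             section_lines = []
--             while index < len(lines) and not lines[index].startswith("## "):
--                 section_lines.append(lines[index])
--                 index += 1
--
--             bullet_lines = [item for item in section_lines if item.startswith("- [[")]
--             if bullet_lines and len(bullet_lines) == len([item for item in section_lines if item.strip()]):
--                 blank_count = len([item for item in section_lines if not item.strip()])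
--                 normalized_lines.extend([""] * min(blank_count, 1))
--                 normalized_lines.extend(sorted(bullet_lines))
--                 if blank_count:
--                     normalized_lines.append("")
--             else:
--                 normalized_lines.extend(section_lines)
--             continue
--         normalized_lines.append(line)
--         index += 1
--     return normalized_lines
-- ===== SOURCE B (Python) =====
-- def _chunks(lines):
--     """Split lines into maximal chunks, each (after the preamble) starting with a '## ' header."""
--     res = []
--     k = 0
--     while k < len(lines) and not lines[k].startswith("## "):
--         k += 1
--     if k:
--         res.append(lines[:k])
--     rest = lines[k:]
--     while rest:
--         j = 1
--         while j < len(rest) and not rest[j].startswith("## "):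
--             j += 1
--         res.append(rest[:j])
--         rest = rest[j:]
--     return res
--
--
-- def _norm_tail(tail):
--     """Normalize the body of a '## Tools' section in one pass."""
--     bullets = []
--     blanks = 0
--     other = False
--     for item in tail:
--         if not item.strip():
--             blanks += 1
--         elif item.startswith("- [["):
--             bullets.append(item)
--         else:
--             other = True
--     if bullets and not other:
--         return [""] * min(blanks, 1) + sorted(bullets) + ([""] if blanks else [])
--     return tail
--
--
-- def normalize_tool_sections(lines):
--     out = []
--     for chunk in _chunks(lines):
--         if chunk[0] == "## Tools":
--             out.append(chunk[0])
--             out.extend(_norm_tail(chunk[1:]))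
--         else:
--             out.extend(chunk)
--     return out
-- ===== Notes on version B (the rewrite author's own statement) =====
-- stated objective: alternative
-- what changed: B replaces A's single index-walk (with an inner cursor-advancing while and 'continue') by a two-phase pipeline: first partition the lines into '## '-headed chunks, then render each chunk, normalizing a '## Tools' chunk's tail with a single-pass scan accumulating (bullets, blank count, other-flag) instead of A's three separate filter comprehensions.
import Mathlib
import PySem

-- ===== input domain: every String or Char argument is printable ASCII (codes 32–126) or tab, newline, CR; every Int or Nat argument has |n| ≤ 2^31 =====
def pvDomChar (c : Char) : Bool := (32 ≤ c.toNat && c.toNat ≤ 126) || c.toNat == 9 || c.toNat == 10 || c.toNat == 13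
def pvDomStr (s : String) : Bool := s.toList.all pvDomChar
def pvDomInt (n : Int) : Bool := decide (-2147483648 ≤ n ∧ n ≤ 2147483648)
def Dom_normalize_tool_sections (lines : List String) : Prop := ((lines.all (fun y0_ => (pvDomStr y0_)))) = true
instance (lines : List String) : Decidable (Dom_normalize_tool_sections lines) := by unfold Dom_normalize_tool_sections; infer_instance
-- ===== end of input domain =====

-- B re-decomposes A's single index-walk as: partition the lines into '## '-headed chunks,
-- normalize each '## Tools' chunk's tail with a one-pass scan, and concatenate (alternative
-- decomposition, same O(n) cost up to the shared sort).


-- shared tiny predicates (direct ports of the Python tests used by both files)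
def pvIsHdr (s : String) : Bool := PySem.Str.startswith s "## "
def pvIsBullet (s : String) : Bool := PySem.Str.startswith s "- [["
def pvIsBlank (s : String) : Bool := PySem.Str.strip s == ""
def pvNotHdr (s : String) : Bool := !pvIsHdr s

-- ===== PORT A =====
-- the body of A's 'if line == "## Tools"' branch after the inner while has collected section_lines
def pvSectionA (sec : List String) : List String :=
  let bullet := sec.filter pvIsBullet
  if !bullet.isEmpty && bullet.length == (sec.filter (fun s => !pvIsBlank s)).length then
    let blank_count := (sec.filter pvIsBlank).length
    List.replicate (min blank_count 1) "" ++ PySem.List.sorted bullet (fun x => x) ++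
      (if blank_count ≠ 0 then [""] else [])
  else sec

-- A's outer while loop with the continue: the inner while is the takeWhile/dropWhile split
def normalize_tool_sections : List String → List String
  | [] => []
  | l :: rest =>
    if l == "## Tools" then
      l :: (pvSectionA (rest.takeWhile pvNotHdr) ++ normalize_tool_sections (rest.dropWhile pvNotHdr))
    else l :: normalize_tool_sections rest
termination_by lines => lines.length
decreasing_by
  · exact Nat.lt_succ_of_le (List.length_dropWhile_le _ _)
  · simp

-- ===== PORT B =====
-- Source B _chunks: the header-led chunks after the preamble
def pvChunksRest : List String → List (List String)
  | [] => []
  | h :: t => (h :: t.takeWhile pvNotHdr) :: pvChunksRest (t.dropWhile pvNotHdr)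
termination_by xs => xs.length
decreasing_by
  exact Nat.lt_succ_of_le (List.length_dropWhile_le _ _)

def pvChunks (lines : List String) : List (List String) :=
  let pre := lines.takeWhile pvNotHdr
  (if pre.isEmpty then [] else [pre]) ++ pvChunksRest (lines.dropWhile pvNotHdr)

-- Source B _norm_tail: one for-loop pass accumulating (bullets, blanks, other)
def pvScanStep (acc : List String × Nat × Bool) (item : String) : List String × Nat × Bool :=
  if pvIsBlank item then (acc.1, acc.2.1 + 1, acc.2.2)
  else if pvIsBullet item then (acc.1 ++ [item], acc.2.1, acc.2.2)
  else (acc.1, acc.2.1, true)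

def pvNormTail (tail : List String) : List String :=
  let st := tail.foldl pvScanStep ([], 0, false)
  if !st.1.isEmpty && !st.2.2 then
    List.replicate (min st.2.1 1) "" ++ PySem.List.sorted st.1 (fun x => x) ++
      (if st.2.1 ≠ 0 then [""] else [])
  else tail

def pvRender (chunk : List String) : List String :=
  match chunk with
  | [] => []   -- unreachable: _chunks only produces nonempty chunks
  | h :: t => if h == "## Tools" then h :: pvNormTail t else h :: t

def normalize_tool_sections_alt (lines : List String) : List String :=
  (pvChunks lines).foldl (fun out ch => out ++ pvRender ch) []

-- ===== PRECONDITION & SPEC =====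
def Spec_normalize_tool_sections (lines : List String) (out : List String) : Prop := out = normalize_tool_sections_alt lines
instance (lines : List String) (out : List String) : Decidable (Spec_normalize_tool_sections lines out) := by unfold Spec_normalize_tool_sections; infer_instance

-- ===== CLAIM (what is proved, stated in full; the proofs are below) =====
def Claim_equal_normalize_tool_sections : Prop := ∀ (lines : List String), Dom_normalize_tool_sections lines → Spec_normalize_tool_sections lines (normalize_tool_sections lines)

-- ===== LEMMAS AND PROOFS =====

-- generic helpers about dropWhile
theorem pvDropWhile_ne_nil {α : Type} {p : α → Bool} {l : List α} {c : α}
    (hc : c ∈ l) (hpc : p c = false) : l.dropWhile p ≠ [] := by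
  intro hn
  rw [List.dropWhile_eq_nil_iff] at hn
  rw [hn c hc] at hpc
  simp at hpc

theorem pvMem_dropWhile {α : Type} {p : α → Bool} {l : List α} {c : α}
    (hc : c ∈ l) (hpc : p c = false) : c ∈ l.dropWhile p := by
  have := List.takeWhile_append_dropWhile (p := p) (l := l)
  rw [← this] at hc
  rcases List.mem_append.mp hc with h | h
  · have := List.mem_takeWhile_imp h
    rw [this] at hpc; simp at hpc
  · exact h

theorem pvHead_dropWhile {α : Type} {p : α → Bool} {l : List α} {d : α} {ds : List α}
    (hd : l.dropWhile p = d :: ds) : p d = false := by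
  induction l with
  | nil => simp at hd
  | cons x xs ih =>
    rw [List.dropWhile_cons] at hd
    split at hd
    · exact ih hd
    · next h => cases hd; simpa using h

-- a line starting with "- [[" is not blank after strip
theorem pvBullet_not_blank (s : String) (h : pvIsBullet s = true) : pvIsBlank s = false := by
  unfold pvIsBullet at h
  unfold pvIsBlank
  simp [PySem.Str.startswith] at h
  rcases (PySem.Chars.startswith_iff _ _).1 h with ⟨t, ht⟩
  have hmem : '-' ∈ s.toList := by rw [← ht]; simp
  have hsp : PySem.Chars.isspace '-' = false := by decide
  have hne : PySem.Chars.strip s.toList ≠ [] := by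
    unfold PySem.Chars.strip PySem.Chars.lstrip PySem.Chars.rstrip
    have hm1 : '-' ∈ List.dropWhile PySem.Chars.isspace s.toList := pvMem_dropWhile hmem hsp
    have hm2 : '-' ∈ (List.dropWhile PySem.Chars.isspace s.toList).reverse :=
      List.mem_reverse.mpr hm1
    intro hnil
    rw [List.reverse_eq_nil_iff] at hnil
    exact pvDropWhile_ne_nil hm2 hsp hnil
  rw [beq_eq_false_iff_ne]
  intro hcontra
  unfold PySem.Str.strip at hcontra
  exact hne (by simpa using congrArg String.toList hcontra)

-- characterize the one-pass scan by the three filters/any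
theorem pvScan_spec (tail : List String) (bs : List String) (n : Nat) (o : Bool) :
    tail.foldl pvScanStep (bs, n, o) =
      (bs ++ tail.filter pvIsBullet, n + (tail.filter pvIsBlank).length,
        o || tail.any (fun x => !pvIsBlank x && !pvIsBullet x)) := by
  induction tail generalizing bs n o with
  | nil => simp
  | cons x xs ih =>
    simp only [List.foldl_cons, List.filter_cons, List.any_cons]
    by_cases hb : pvIsBlank x = true
    · have hbl : pvIsBullet x = false := by
        by_contra hc
        have := pvBullet_not_blank x (by simpa using hc)
        simp [this] at hb
      simp [pvScanStep, hb, hbl, ih, Nat.add_comm, Nat.add_left_comm]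
    · replace hb : pvIsBlank x = false := by simpa using hb
      by_cases hbl : pvIsBullet x = true
      · simp [pvScanStep, hb, hbl, ih]
      · replace hbl : pvIsBullet x = false := by simpa using hbl
        simp [pvScanStep, hb, hbl, ih]

-- the two section normalizers agree
theorem pvSection_eq (sec : List String) : pvSectionA sec = pvNormTail sec := by
  unfold pvSectionA pvNormTail
  rw [pvScan_spec]
  simp only [Nat.zero_add, Bool.false_or, List.nil_append]
  -- equality of the two guards
  have hguard : (!(sec.filter pvIsBullet).isEmpty &&
      (sec.filter pvIsBullet).length == (sec.filter (fun s => !pvIsBlank s)).length) =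
      (!(sec.filter pvIsBullet).isEmpty &&
      !(sec.any (fun x => !pvIsBlank x && !pvIsBullet x))) := by
    by_cases hemp : (sec.filter pvIsBullet).isEmpty
    · simp [hemp]
    · simp only [hemp, Bool.not_false, Bool.true_and]
      have hsub : sec.filter pvIsBullet = (sec.filter (fun s => !pvIsBlank s)).filter pvIsBullet := by
        rw [List.filter_filter]
        apply List.filter_congr
        intro x _
        by_cases hx : pvIsBullet x = true
        · simp [hx, pvBullet_not_blank x hx]
        · simp [Bool.eq_false_iff.mpr hx]
      rw [hsub]
      rcases Bool.eq_false_or_eq_true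
        ((((sec.filter (fun s => !pvIsBlank s)).filter pvIsBullet).length ==
          (sec.filter (fun s => !pvIsBlank s)).length : Bool)) with hb | hb <;> rw [hb]
      · symm
        rw [Bool.not_eq_true', List.any_eq_false]
        rw [beq_iff_eq, List.length_filter_eq_length_iff] at hb
        intro x hx
        by_cases hbk : pvIsBlank x = true
        · simp [hbk]
        · replace hbk : pvIsBlank x = false := by simpa using hbk
          have := hb x (List.mem_filter.mpr ⟨hx, by simp [hbk]⟩)
          simp [this]
      · symm
        rw [Bool.not_eq_false', List.any_eq_true]
        rw [beq_eq_false_iff_ne] at hb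
        by_contra hno
        push Not at hno
        apply hb
        rw [List.length_filter_eq_length_iff]
        intro x hx
        rcases List.mem_filter.mp hx with ⟨hxm, hxnb⟩
        by_contra hxb
        exact hno x hxm (by simp at hxnb hxb ⊢; exact ⟨hxnb, by simpa using hxb⟩)
  rw [hguard]

-- lines that are not headers pass straight through A's loop
theorem pvPassthrough (xs : List String) :
    normalize_tool_sections xs =
      xs.takeWhile pvNotHdr ++ normalize_tool_sections (xs.dropWhile pvNotHdr) := by
  induction xs with
  | nil => simp
  | cons x t ih =>
    by_cases hx : pvIsHdr x = true
    · rw [List.takeWhile_cons, List.dropWhile_cons]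
      simp [pvNotHdr, hx]
    · replace hx : pvIsHdr x = false := by simpa using hx
      have hxt : (x == "## Tools") = false := by
        rw [beq_eq_false_iff_ne]
        intro he
        rw [he] at hx
        simp [pvIsHdr, PySem.Str.startswith, PySem.Chars.startswith] at hx
      rw [List.takeWhile_cons, List.dropWhile_cons]
      simp only [pvNotHdr, hx, Bool.not_false, reduceIte]
      rw [normalize_tool_sections, hxt]
      simp only [Bool.false_eq_true, if_false, List.cons_append]
      rw [ih]

-- chunk rendering of a header-led (or empty) suffix reproduces A's loop
theorem pvChunksRest_flat (xs : List String)
    (hx : xs = [] ∨ ∃ h t, xs = h :: t ∧ pvIsHdr h = true) :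
    (pvChunksRest xs).flatMap pvRender = normalize_tool_sections xs := by
  rcases hx with rfl | ⟨h, t, rfl, hh⟩
  · simp [pvChunksRest, normalize_tool_sections]
  · rw [pvChunksRest]
    rw [List.flatMap_cons]
    have hdrop : t.dropWhile pvNotHdr = [] ∨
        ∃ h' t', t.dropWhile pvNotHdr = h' :: t' ∧ pvIsHdr h' = true := by
      cases hd : t.dropWhile pvNotHdr with
      | nil => exact Or.inl rfl
      | cons d ds =>
        refine Or.inr ⟨d, ds, rfl, ?_⟩
        have := pvHead_dropWhile hd
        simpa [pvNotHdr] using this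
    have ih := pvChunksRest_flat (t.dropWhile pvNotHdr) hdrop
    rw [ih]
    by_cases ht : (h == "## Tools") = true
    · have : h = "## Tools" := by simpa using ht
      rw [normalize_tool_sections, if_pos ht]
      simp [pvRender, ht, pvSection_eq]
    · replace ht : (h == "## Tools") = false := by simpa using ht
      rw [normalize_tool_sections]
      simp only [ht, Bool.false_eq_true, if_false]
      rw [pvPassthrough t]
      simp [pvRender, ht]
termination_by xs.length
decreasing_by
  rename_i _ hleft
  rw [hleft]
  exact Nat.lt_succ_of_le (List.length_dropWhile_le _ _)

theorem pvMain (lines : List String) :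
    normalize_tool_sections lines = normalize_tool_sections_alt lines := by
  unfold normalize_tool_sections_alt pvChunks
  rw [PySem.List.foldl_append_eq_flatMap]
  rw [List.nil_append, List.flatMap_append]
  have hdrop : lines.dropWhile pvNotHdr = [] ∨
      ∃ h' t', lines.dropWhile pvNotHdr = h' :: t' ∧ pvIsHdr h' = true := by
    cases hd : lines.dropWhile pvNotHdr with
    | nil => exact Or.inl rfl
    | cons d ds =>
      refine Or.inr ⟨d, ds, rfl, ?_⟩
      have := pvHead_dropWhile hd
      simpa [pvNotHdr] using this
  rw [pvChunksRest_flat _ hdrop]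
  rw [pvPassthrough lines]
  congr 1
  cases hp : lines.takeWhile pvNotHdr with
  | nil => simp
  | cons p ps =>
    have hpn : pvNotHdr p = true := List.mem_takeWhile_imp (by rw [hp]; simp)
    have hpt : (p == "## Tools") = false := by
      rw [beq_eq_false_iff_ne]
      intro he
      rw [he] at hpn
      simp [pvNotHdr, pvIsHdr, PySem.Str.startswith, PySem.Chars.startswith] at hpn
    simp [pvRender, hpt]

-- ===== VERDICT (by name: the statement is the Claim_ definition above) =====
theorem normalize_tool_sections_spec : Claim_equal_normalize_tool_sections := by
  intro lines _
  exact pvMain lines
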